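-- pv_equiv track=rewrite | github.com/HyeongSeoku/Programmers_CodingTest | python/datastructure/notepad.py | notepad
-- ===== SOURCE A (Python) =====
-- def notepad(s, commands) :
--     #L = 왼쪽으로 커서 이동 R=오른쪽으로 커서이동
--     #D = 커서 왼쪽의 문자 삭제 이미 왼쪽일 경우 return
--     #P x = x를 커서 왼쪽에 추가
--     left = list(s);
--     right = [];
--
--     for line in commands:
--         command = line.split();
--
--         action = command[0];
--         if action == 'L':
--             if len(left) > 0:
--                 right.append(left.pop());
--
--         elif action == 'R':
--             if len(right) >0:
--                 left.append(right.pop());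
--
--         elif action == 'D':
--             if len(left)>0:
--                 left.pop();
--
--         elif action == 'P':
--                 left.append(command[1]);
--
--
--     result = left +right[::-1]
--
--     return "".join(result)
-- ===== SOURCE B (Python) =====
-- def notepad(s, commands):
--     text = list(s)
--     cursor = len(text)
--     for line in commands:
--         command = line.split()
--         action = command[0]
--         if action == 'L':
--             if cursor > 0:
--                 cursor -= 1
--         elif action == 'R':
--             if cursor < len(text):
--                 cursor += 1
--         elif action == 'D':
--             if cursor > 0:
--                 del text[cursor - 1]
--                 cursor -= 1
--         elif action == 'P':
--             text.insert(cursor, command[1])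
--             cursor += 1
--     return "".join(text)
-- ===== Notes on version B (the rewrite author's own statement) =====
-- stated objective: alternative
-- what changed: Replaces the two-stack (left/right) representation with a single list plus an integer cursor: L/R only move the cursor instead of shuttling elements between stacks, D deletes at cursor-1, P inserts at the cursor.
import Mathlib
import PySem

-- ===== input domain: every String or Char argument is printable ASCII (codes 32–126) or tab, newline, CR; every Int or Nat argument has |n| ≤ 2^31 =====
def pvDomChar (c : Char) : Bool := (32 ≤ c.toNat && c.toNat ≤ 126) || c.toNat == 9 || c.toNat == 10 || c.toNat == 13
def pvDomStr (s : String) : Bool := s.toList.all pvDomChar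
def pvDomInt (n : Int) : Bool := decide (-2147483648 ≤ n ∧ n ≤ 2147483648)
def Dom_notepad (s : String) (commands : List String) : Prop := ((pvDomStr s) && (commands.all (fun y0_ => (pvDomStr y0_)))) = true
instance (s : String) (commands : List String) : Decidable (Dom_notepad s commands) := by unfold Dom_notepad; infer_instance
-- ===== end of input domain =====

-- B replaces A's two-stack (left/right) representation by one list plus an integer
-- cursor (L/R only move the cursor); equivalence of return values is proved on Pre_.

-- ===== PORT A =====
-- one step of A's for-loop over `commands`; state = (left, right)
def notepadStepA (st : List String × List String) (line : String) : List String × List String :=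
  let command := PySem.Str.split₀ line          -- line.split()
  let action := PySem.List.pyGetD command 0 ""  -- command[0]; in range under Pre_
  if action = "L" then
    if st.1.length > 0 then (st.1.dropLast, st.2 ++ [st.1.getLast!])  -- right.append(left.pop())
    else st
  else if action = "R" then
    if st.2.length > 0 then (st.1 ++ [st.2.getLast!], st.2.dropLast)  -- left.append(right.pop())
    else st
  else if action = "D" then
    if st.1.length > 0 then (st.1.dropLast, st.2)                     -- left.pop()
    else st
  else if action = "P" then
    (st.1 ++ [PySem.List.pyGetD command 1 ""], st.2)                  -- left.append(command[1]); in range under Pre_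
  else st

def notepad (s : String) (commands : List String) : String :=
  let fin := commands.foldl notepadStepA (s.toList.map (fun c => String.ofList [c]), ([] : List String))
  PySem.Str.join "" (fin.1 ++ fin.2.reverse)    -- "".join(left + right[::-1])

-- ===== PORT B =====
-- one step of B's for-loop; state = (text, cursor); the guards keep 0 ≤ cursor ≤ text.length
def notepadStepB (st : List String × Nat) (line : String) : List String × Nat :=
  let command := PySem.Str.split₀ line
  let action := PySem.List.pyGetD command 0 ""
  if action = "L" then
    (st.1, if st.2 > 0 then st.2 - 1 else st.2)
  else if action = "R" then
    (st.1, if st.2 < st.1.length then st.2 + 1 else st.2)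
  else if action = "D" then
    if st.2 > 0 then (st.1.take (st.2 - 1) ++ st.1.drop st.2, st.2 - 1)  -- del text[cursor-1] (in range: 0 < cursor ≤ len)
    else st
  else if action = "P" then
    (st.1.insertIdx st.2 (PySem.List.pyGetD command 1 ""), st.2 + 1)     -- text.insert(cursor, command[1])
  else st

def notepad_alt (s : String) (commands : List String) : String :=
  let text := s.toList.map (fun c => String.ofList [c])
  let fin := commands.foldl notepadStepB (text, text.length)
  PySem.Str.join "" fin.1

-- ===== PRECONDITION & SPEC =====
-- Pre_ excludes exactly the inputs where Python A raises IndexError: a command line whose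
-- split() is empty (command[0]) or a 'P' line with no second token (command[1]).
def Pre_notepad (s : String) (commands : List String) : Prop :=
  ∀ line ∈ commands, PySem.Str.split₀ line ≠ [] ∧
    (PySem.List.pyGetD (PySem.Str.split₀ line) 0 "" = "P" → 2 ≤ (PySem.Str.split₀ line).length)
instance (s : String) (commands : List String) : Decidable (Pre_notepad s commands) := by
  unfold Pre_notepad; infer_instance
def pvWitness_notepad : String × List String := ("ab", ["L", "P xy", "D", "R"])

def Spec_notepad (s : String) (commands : List String) (out : String) : Prop := out = notepad_alt s commands
instance (s : String) (commands : List String) (out : String) : Decidable (Spec_notepad s commands out) := by unfold Spec_notepad; infer_instance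

-- ===== CLAIM (what is proved, stated in full; the proofs are below) =====
def Claim_equal_notepad : Prop := ∀ (s : String) (commands : List String), Dom_notepad s commands → Pre_notepad s commands → Spec_notepad s commands (notepad s commands)

-- ===== LEMMAS AND PROOFS =====

-- the simulation relation between A's state (left, right) and B's state (text, cursor)
def notepadRel (a : List String × List String) (b : List String × Nat) : Prop :=
  b.1 = a.1 ++ a.2.reverse ∧ b.2 = a.1.length

theorem notepad_insertIdx_length_append {α : Type} (l y : List α) (a : α) :
    (l ++ y).insertIdx l.length a = l ++ a :: y := by
  induction l with
  | nil => rfl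
  | cons x xs ih => simpa [List.insertIdx] using ih

theorem notepad_getLast!_eq (l : List String) (h : l ≠ []) : l.getLast! = l.getLast h := by
  cases l with
  | nil => exact absurd rfl h
  | cons a as => simp [List.getLast!]

theorem notepad_reverse_eq_getLast_cons (r : List String) (h : r ≠ []) :
    r.reverse = r.getLast h :: r.dropLast.reverse := by
  conv_lhs => rw [← List.dropLast_append_getLast h]
  simp

theorem notepadStepA_rel (l r : List String) (line : String) :
    notepadRel (notepadStepA (l, r) line) (notepadStepB (l ++ r.reverse, l.length) line) := by
  unfold notepadStepA notepadStepB
  by_cases hL : PySem.List.pyGetD (PySem.Str.split₀ line) 0 "" = "L"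
  · simp only [if_pos hL]
    by_cases hl : l = []
    · subst hl; simp [notepadRel]
    · have h0 : 0 < l.length := List.length_pos_iff.mpr hl
      simp only [if_pos h0, gt_iff_lt]
      refine ⟨?_, by simp⟩
      show l ++ r.reverse = l.dropLast ++ (r ++ [l.getLast!]).reverse
      calc l ++ r.reverse = (l.dropLast ++ [l.getLast hl]) ++ r.reverse := by
            rw [List.dropLast_append_getLast hl]
        _ = l.dropLast ++ (r ++ [l.getLast!]).reverse := by
            rw [notepad_getLast!_eq l hl]; simp
  · by_cases hR : PySem.List.pyGetD (PySem.Str.split₀ line) 0 "" = "R"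
    · simp only [if_neg hL, if_pos hR]
      by_cases hr : r = []
      · subst hr; simp [notepadRel]
      · have h0 : 0 < r.length := List.length_pos_iff.mpr hr
        have h1 : l.length < (l ++ r.reverse).length := by simp [h0]
        simp only [if_pos h0, if_pos h1, gt_iff_lt]
        refine ⟨?_, by simp⟩
        show l ++ r.reverse = (l ++ [r.getLast!]) ++ r.dropLast.reverse
        rw [notepad_getLast!_eq r hr, notepad_reverse_eq_getLast_cons r hr]
        simp
    · by_cases hD : PySem.List.pyGetD (PySem.Str.split₀ line) 0 "" = "D"
      · simp only [if_neg hL, if_neg hR, if_pos hD]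
        by_cases hl : l = []
        · subst hl; simp [notepadRel]
        · have h0 : 0 < l.length := List.length_pos_iff.mpr hl
          simp only [if_pos h0, gt_iff_lt]
          refine ⟨?_, by simp [List.length_dropLast]⟩
          show List.take (l.length - 1) (l ++ r.reverse) ++ List.drop l.length (l ++ r.reverse)
              = l.dropLast ++ r.reverse
          rw [List.take_append_of_le_length (by omega), List.dropLast_eq_take]
          simp
      · by_cases hP : PySem.List.pyGetD (PySem.Str.split₀ line) 0 "" = "P"
        · simp only [if_neg hL, if_neg hR, if_neg hD, if_pos hP]
          refine ⟨?_, by simp⟩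
          show (l ++ r.reverse).insertIdx l.length (PySem.List.pyGetD (PySem.Str.split₀ line) 1 "")
              = (l ++ [PySem.List.pyGetD (PySem.Str.split₀ line) 1 ""]) ++ r.reverse
          rw [notepad_insertIdx_length_append]
          simp
        · simp only [if_neg hL, if_neg hR, if_neg hD, if_neg hP]
          exact ⟨rfl, rfl⟩

theorem notepad_fold_rel (commands : List String) (a : List String × List String)
    (b : List String × Nat) (h : notepadRel a b) :
    notepadRel (commands.foldl notepadStepA a) (commands.foldl notepadStepB b) := by
  induction commands generalizing a b with
  | nil => simpa using h
  | cons x xs ih =>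
      obtain ⟨l, r⟩ := a
      obtain ⟨ht, hc⟩ := h
      simp only at ht hc
      simp only [List.foldl_cons]
      have hb : b = (l ++ r.reverse, l.length) := by
        obtain ⟨t, c⟩ := b; simp_all
      rw [hb]
      exact ih _ _ (notepadStepA_rel l r x)

-- ===== VERDICT (by name: the statement is the Claim_ definition above) =====
theorem notepad_spec : Claim_equal_notepad := by
  intro s commands _ _
  unfold Spec_notepad notepad notepad_alt
  have h := notepad_fold_rel commands
    (s.toList.map (fun c => String.ofList [c]), ([] : List String))
    (s.toList.map (fun c => String.ofList [c]), (s.toList.map (fun c => String.ofList [c])).length)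
    (by simp [notepadRel])
  obtain ⟨h1, _⟩ := h
  simp only [h1]
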